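-- pv_equiv track=rewrite | github.com/marlonedwards/act-r-poker | poker.py | count_straight_draw
-- ===== SOURCE A (Python) =====
-- def card_rank(card):
--     """Get numeric rank of card (A=14, K=13, etc.)"""
--     rank_map = {'A': 14, 'K': 13, 'Q': 12, 'J': 11, 'T': 10,
--                 '9': 9, '8': 8, '7': 7, '6': 6, '5': 5,
--                 '4': 4, '3': 3, '2': 2}
--     return rank_map.get(card[0], 0)
--
-- def count_straight_draw(cards):
--     """
--     Check for straight draws.
--     Returns: 'oesd' (open-ended), 'gutshot', or None
--     """
--     ranks = sorted(set(card_rank(c) for c in cards))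
--
--     # Check for open-ended straight draw (4 consecutive)
--     for i in range(len(ranks) - 3):
--         if ranks[i+3] - ranks[i] == 3:
--             # 4 consecutive cards
--             # Check if it's open-ended (not at edges)
--             if ranks[i] > 2 and ranks[i+3] < 14:
--                 return 'oesd'
--
--     # Check for gutshot (4 cards with one gap)
--     for i in range(len(ranks) - 3):
--         if ranks[i+3] - ranks[i] == 4:
--             # Could be a gutshot (one gap in 5 cards)
--             return 'gutshot'
--
--     # Check for wheel draw (A-2-3-4 or similar)
--     wheel_ranks = [14, 2, 3, 4, 5]
--     wheel_count = sum(1 for r in ranks if r in wheel_ranks)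
--     if wheel_count >= 4:
--         return 'oesd' if wheel_count == 4 else None
--
--     return None
-- ===== SOURCE B (Python) =====
-- RANK_BITS = {'A': 1 << 14, 'K': 1 << 13, 'Q': 1 << 12, 'J': 1 << 11, 'T': 1 << 10,
--              '9': 1 << 9, '8': 1 << 8, '7': 1 << 7, '6': 1 << 6, '5': 1 << 5,
--              '4': 1 << 4, '3': 1 << 3, '2': 1 << 2}
--
-- def count_straight_draw(cards):
--     """
--     Check for straight draws via a 15-bit presence mask of the distinct ranks
--     (bit 0 = unknown card), probing fixed candidate straight windows.
--     Returns: 'oesd' (open-ended), 'gutshot', or None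
--     """
--     mask = 0
--     for c in cards:
--         mask |= RANK_BITS.get(c[0], 1)
--     # open-ended: four consecutive ranks r..r+3 all present, interior (3 <= r <= 10)
--     for r in range(3, 11):
--         if (mask >> r) & 15 == 15:
--             return 'oesd'
--     # gutshot: r and r+4 present with exactly two of r+1, r+2, r+3 present
--     for r in range(0, 11):
--         if (mask >> r) & 17 == 17 and \
--            ((mask >> (r + 1)) & 1) + ((mask >> (r + 2)) & 1) + ((mask >> (r + 3)) & 1) == 2:
--             return 'gutshot'
--     # wheel draw: exactly four of A,2,3,4,5 present
--     wheel = ((mask >> 2) & 1) + ((mask >> 3) & 1) + ((mask >> 4) & 1) \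
--           + ((mask >> 5) & 1) + ((mask >> 14) & 1)
--     return 'oesd' if wheel == 4 else None
-- ===== Notes on version B (the rewrite author's own statement) =====
-- stated objective: faster
-- what changed: B replaces A's sort-the-distinct-ranks plus two sliding-window index scans by a 15-bit rank-presence bitmask built in one pass and probed at the fixed candidate straight windows (r..r+3 for oesd, r/r+4 with exactly two gap bits for gutshot), keeping the wheel count as a sum of five mask bits.
import Mathlib
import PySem

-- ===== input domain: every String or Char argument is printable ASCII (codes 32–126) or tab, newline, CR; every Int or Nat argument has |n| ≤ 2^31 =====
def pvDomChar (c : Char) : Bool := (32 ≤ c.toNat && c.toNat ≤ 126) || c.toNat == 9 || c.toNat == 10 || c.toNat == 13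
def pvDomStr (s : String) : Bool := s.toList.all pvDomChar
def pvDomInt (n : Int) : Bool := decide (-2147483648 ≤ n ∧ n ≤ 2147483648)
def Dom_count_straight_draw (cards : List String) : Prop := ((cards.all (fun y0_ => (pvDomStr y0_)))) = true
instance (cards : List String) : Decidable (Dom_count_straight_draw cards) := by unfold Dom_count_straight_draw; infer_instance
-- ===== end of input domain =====

-- B replaces A's sort-the-distinct-ranks + sliding-window index scans by a 15-bit rank-presence
-- bitmask built in one pass and probed at fixed candidate straight windows (measured faster by the
-- timing run; the equivalence below is exact on all inputs without an empty-string card).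

-- ===== PORT A =====
def card_rank_map : PySem.Dict Char Int :=
  PySem.Dict.ofList [('A', 14), ('K', 13), ('Q', 12), ('J', 11), ('T', 10),
                     ('9', 9), ('8', 8), ('7', 7), ('6', 6), ('5', 5),
                     ('4', 4), ('3', 3), ('2', 2)]

-- card[0]: IndexError on "" (excluded by Pre_); the `none` branch is unreachable there
def card_rank (card : String) : Int :=
  match PySem.Str.pyGet? card 0 with
  | some ch => card_rank_map.getD ch 0
  | none => 0

-- first loop of A: for i in range(len(ranks) - 3), indices always in range
def oesdScan (ranks : List Int) : List Int → Option String
  | [] => none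
  | i :: is =>
    if PySem.List.pyGetD ranks (i + 3) 0 - PySem.List.pyGetD ranks i 0 = 3 then
      if 2 < PySem.List.pyGetD ranks i 0 ∧ PySem.List.pyGetD ranks (i + 3) 0 < 14 then
        some "oesd"
      else oesdScan ranks is
    else oesdScan ranks is

-- second loop of A
def gutshotScan (ranks : List Int) : List Int → Option String
  | [] => none
  | i :: is =>
    if PySem.List.pyGetD ranks (i + 3) 0 - PySem.List.pyGetD ranks i 0 = 4 then
      some "gutshot"
    else gutshotScan ranks is

-- body of A after `ranks = sorted(set(...))`
def straight_from_ranks (ranks : List Int) : Option String :=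
  match oesdScan ranks (PySem.List.pyRange 0 (PySem.List.len ranks - 3) 1) with
  | some s => some s
  | none =>
    match gutshotScan ranks (PySem.List.pyRange 0 (PySem.List.len ranks - 3) 1) with
    | some s => some s
    | none =>
      let wheelCount := (ranks.map (fun r => if r ∈ ([14, 2, 3, 4, 5] : List Int) then (1 : Int) else 0)).sum
      if 4 ≤ wheelCount then (if wheelCount = 4 then some "oesd" else none) else none

def count_straight_draw (cards : List String) : Option String :=
  straight_from_ranks (PySem.List.sorted (PySem.Set.ofList (cards.map card_rank)) (fun x => x) false)

-- ===== PORT B =====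
def rank_bits : PySem.Dict Char Nat :=
  PySem.Dict.ofList [('A', 1 <<< 14), ('K', 1 <<< 13), ('Q', 1 <<< 12), ('J', 1 <<< 11), ('T', 1 <<< 10),
                     ('9', 1 <<< 9), ('8', 1 <<< 8), ('7', 1 <<< 7), ('6', 1 <<< 6), ('5', 1 <<< 5),
                     ('4', 1 <<< 4), ('3', 1 <<< 3), ('2', 1 <<< 2)]

-- RANK_BITS.get(c[0], 1); c[0]: IndexError on "" (excluded by Pre_); `none` branch unreachable there
def rank_bit (card : String) : Nat :=
  match PySem.Str.pyGet? card 0 with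
  | some ch => rank_bits.getD ch 1
  | none => 1

def oesdProbe (mask : Nat) : List Int → Option String
  | [] => none
  | r :: rs =>
    if (mask >>> r.toNat) &&& 15 = 15 then some "oesd" else oesdProbe mask rs

def gutshotProbe (mask : Nat) : List Int → Option String
  | [] => none
  | r :: rs =>
    if (mask >>> r.toNat) &&& 17 = 17 ∧
       ((mask >>> (r.toNat + 1)) &&& 1) + ((mask >>> (r.toNat + 2)) &&& 1) + ((mask >>> (r.toNat + 3)) &&& 1) = 2
    then some "gutshot" else gutshotProbe mask rs

def straight_from_mask (mask : Nat) : Option String :=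
  match oesdProbe mask (PySem.List.pyRange 3 11 1) with
  | some s => some s
  | none =>
    match gutshotProbe mask (PySem.List.pyRange 0 11 1) with
    | some s => some s
    | none =>
      let wheel := ((mask >>> 2) &&& 1) + ((mask >>> 3) &&& 1) + ((mask >>> 4) &&& 1)
                 + ((mask >>> 5) &&& 1) + ((mask >>> 14) &&& 1)
      if wheel = 4 then some "oesd" else none

def count_straight_draw_alt (cards : List String) : Option String :=
  straight_from_mask (cards.foldl (fun m c => m ||| rank_bit c) 0)

-- ===== PRECONDITION & SPEC =====
-- Pre_ excludes lists containing an empty string: there A's card_rank raises IndexError (card[0]).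
def Pre_count_straight_draw (cards : List String) : Prop := ∀ c ∈ cards, c ≠ ""
instance (cards : List String) : Decidable (Pre_count_straight_draw cards) := by unfold Pre_count_straight_draw; infer_instance

def pvWitness_count_straight_draw : List String := ["Ah", "Kd", "Qs", "Jc"]

def Spec_count_straight_draw (cards : List String) (out : Option String) : Prop := out = count_straight_draw_alt cards
instance (cards : List String) (out : Option String) : Decidable (Spec_count_straight_draw cards out) := by unfold Spec_count_straight_draw; infer_instance

-- ===== CLAIM (what is proved, stated in full; the proofs are below) =====
def Claim_equal_count_straight_draw : Prop := ∀ (cards : List String), Dom_count_straight_draw cards → Pre_count_straight_draw cards → Spec_count_straight_draw cards (count_straight_draw cards)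

-- ===== LEMMAS AND PROOFS =====

def maskOf (cards : List String) : Nat := cards.foldl (fun m c => m ||| rank_bit c) 0

set_option maxHeartbeats 1000000 in
theorem rank_char_facts (ch : Char) :
    rank_bits.getD ch 1 = 2 ^ (card_rank_map.getD ch 0).toNat ∧
    0 ≤ card_rank_map.getD ch 0 ∧ card_rank_map.getD ch 0 ≤ 14 := by
  have h1 : card_rank_map = PySem.Dict.mk [('A', 14), ('K', 13), ('Q', 12), ('J', 11), ('T', 10),
                     ('9', 9), ('8', 8), ('7', 7), ('6', 6), ('5', 5),
                     ('4', 4), ('3', 3), ('2', 2)] := by rfl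
  have h2 : rank_bits = PySem.Dict.mk [('A', 16384), ('K', 8192), ('Q', 4096), ('J', 2048), ('T', 1024),
                     ('9', 512), ('8', 256), ('7', 128), ('6', 64), ('5', 32),
                     ('4', 16), ('3', 8), ('2', 4)] := by rfl
  rw [h1, h2]
  by_cases h0 : ('A' : Char) = ch
  · subst h0; decide
  by_cases h1 : ('K' : Char) = ch
  · subst h1; decide
  by_cases h2 : ('Q' : Char) = ch
  · subst h2; decide
  by_cases h3 : ('J' : Char) = ch
  · subst h3; decide
  by_cases h4 : ('T' : Char) = ch
  · subst h4; decide
  by_cases h5 : ('9' : Char) = ch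
  · subst h5; decide
  by_cases h6 : ('8' : Char) = ch
  · subst h6; decide
  by_cases h7 : ('7' : Char) = ch
  · subst h7; decide
  by_cases h8 : ('6' : Char) = ch
  · subst h8; decide
  by_cases h9 : ('5' : Char) = ch
  · subst h9; decide
  by_cases h10 : ('4' : Char) = ch
  · subst h10; decide
  by_cases h11 : ('3' : Char) = ch
  · subst h11; decide
  by_cases h12 : ('2' : Char) = ch
  · subst h12; decide
  simp [PySem.Dict.getD, PySem.Dict.get?, h0, h1, h2, h3, h4, h5, h6, h7, h8, h9, h10, h11, h12]

theorem rank_bit_eq (c : String) (hc : c ≠ "") :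
    rank_bit c = 2 ^ (card_rank c).toNat ∧ 0 ≤ card_rank c ∧ card_rank c ≤ 14 := by
  unfold rank_bit card_rank
  cases hg : PySem.Str.pyGet? c 0 with
  | some ch => exact rank_char_facts ch
  | none =>
    exfalso
    rw [show (0:Int) = ((0:Nat):Int) by norm_num, PySem.Str.pyGet?_natCast] at hg
    simp at hg
    exact hc (by cases c; simp_all)

theorem foldl_testBit (cards : List String) (h : ∀ c ∈ cards, c ≠ "") (acc : Nat) (j : Nat) :
    (cards.foldl (fun m c => m ||| rank_bit c) acc).testBit j
      = (acc.testBit j || cards.any (fun c => card_rank c == (j : Int))) := by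
  induction cards generalizing acc with
  | nil => simp
  | cons c cs ih =>
    simp only [List.foldl_cons, List.any_cons]
    rw [ih (fun x hx => h x (List.mem_cons_of_mem _ hx))]
    obtain ⟨hb, h0, _⟩ := rank_bit_eq c (h c List.mem_cons_self)
    rw [Nat.testBit_or, hb, Nat.testBit_two_pow]
    have heq : decide ((card_rank c).toNat = j) = (card_rank c == (j : Int)) := by
      rcases eq_or_ne (card_rank c) ((j:Int)) with hh | hh
      · simp [hh]
      · have h2 : (card_rank c).toNat ≠ j := by omega
        simp [hh, h2]
    rw [heq, Bool.or_assoc, Bool.or_comm (card_rank c == (j:Int))]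

theorem maskOf_testBit (cards : List String) (h : ∀ c ∈ cards, c ≠ "") (j : Nat) :
    (maskOf cards).testBit j = decide ((j : Int) ∈ cards.map card_rank) := by
  rw [maskOf, foldl_testBit cards h 0 j]
  rw [Bool.eq_iff_iff]
  simp [List.any_eq_true, List.mem_map]

theorem bit_ind (m j : Nat) : (m >>> j) &&& 1 = if m.testBit j then 1 else 0 := by
  rw [Nat.and_one_is_mod, Nat.testBit_eq_decide_div_mod_eq, Nat.shiftRight_eq_div_pow]
  split_ifs with h <;> simp_all

theorem and15_iff (m j : Nat) :
    (m >>> j) &&& 15 = 15 ↔ (m.testBit j ∧ m.testBit (j + 1) ∧ m.testBit (j + 2) ∧ m.testBit (j + 3)) := by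
  have h16 := Nat.and_two_pow_sub_one_eq_mod (m >>> j) 4
  norm_num at h16
  have e : ∀ k, m.testBit (j + k) = (m >>> j).testBit k := fun k => (Nat.testBit_shiftRight m).symm
  have e0 : m.testBit j = (m >>> j).testBit 0 := by simpa using (e 0).symm
  rw [h16, e0, e 1, e 2, e 3]
  simp only [Nat.testBit_eq_decide_div_mod_eq, decide_eq_true_eq]
  norm_num
  omega

theorem seventeen_testBit (n : Nat) : (17:Nat).testBit n = (decide (n = 0) || decide (n = 4)) := by
  rcases n with _|_|_|_|_|n <;> simp [Nat.testBit_succ]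

theorem and17_iff (m j : Nat) :
    (m >>> j) &&& 17 = 17 ↔ (m.testBit j ∧ m.testBit (j + 4)) := by
  have e : ∀ k, m.testBit (j + k) = (m >>> j).testBit k := fun k => (Nat.testBit_shiftRight m).symm
  have e0 : m.testBit j = (m >>> j).testBit 0 := by simpa using (e 0).symm
  rw [e0, e 4]
  constructor
  · intro h
    constructor
    · have h0 : ((m >>> j) &&& 17).testBit 0 = (17:Nat).testBit 0 := by rw [h]
      rw [Nat.testBit_and, show (17:Nat).testBit 0 = true from by decide, Bool.and_true] at h0
      exact h0
    · have h4 : ((m >>> j) &&& 17).testBit 4 = (17:Nat).testBit 4 := by rw [h]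
      rw [Nat.testBit_and, show (17:Nat).testBit 4 = true from by decide, Bool.and_true] at h4
      exact h4
  · rintro ⟨h0, h4⟩
    apply Nat.eq_of_testBit_eq
    intro n
    rw [Nat.testBit_and, seventeen_testBit n]
    by_cases hn0 : n = 0
    · subst hn0; simp [h0]
    · by_cases hn4 : n = 4
      · subst hn4; simp [h4]
      · simp [hn0, hn4]

theorem sorted_getElem_mono {L : List Int} (hS : L.Pairwise (· < ·)) {p q : Nat}
    (hq : q < L.length) (hpq : p ≤ q) : L[p]'(by omega) ≤ L[q] := by
  rcases Nat.lt_or_ge p q with h | h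
  · exact le_of_lt (List.pairwise_iff_getElem.mp hS p q (by omega) hq h)
  · have : p = q := by omega
    subst this; rfl

theorem suc_of_sorted {L : List Int} (hS : L.Pairwise (· < ·)) {k : Nat} (hk : k < L.length)
    {b : Int} (hbL : b ∈ L) (hlt : L[k] < b) (hmin : ∀ x ∈ L, L[k] < x → b ≤ x) :
    ∃ h : k + 1 < L.length, L[k + 1] = b := by
  obtain ⟨j, hj, hLj⟩ := List.mem_iff_getElem.mp hbL
  have hmono := List.pairwise_iff_getElem.mp hS
  have hkj : k < j := by
    by_contra hle
    have : L[j] ≤ L[k] := sorted_getElem_mono hS hk (by omega)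
    omega
  have hk1 : k + 1 < L.length := by omega
  refine ⟨hk1, ?_⟩
  rcases Nat.lt_or_ge (k + 1) j with hj1 | hj1
  · exfalso
    have h1 : L[k] < L[k + 1] := hmono k (k+1) hk hk1 (by omega)
    have h2 : L[k + 1] < L[j] := hmono (k+1) j hk1 hj hj1
    have h3 := hmin (L[k + 1]) (List.getElem_mem hk1) h1
    omega
  · have : j = k + 1 := by omega
    subst this; exact hLj

theorem between_of_sorted {L : List Int} (hS : L.Pairwise (· < ·)) {k : Nat}
    (hk3 : k + 3 < L.length) {x : Int} (hx : x ∈ L)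
    (h1 : L[k]'(by omega) < x) (h2 : x < L[k + 3]) :
    x = L[k + 1]'(by omega) ∨ x = L[k + 2]'(by omega) := by
  obtain ⟨j, hj, hLj⟩ := List.mem_iff_getElem.mp hx
  have hmono := List.pairwise_iff_getElem.mp hS
  have hkj : k < j := by
    by_contra hle
    have : L[j] ≤ L[k]'(by omega) := sorted_getElem_mono hS (by omega) (by omega)
    omega
  have hjk3 : j < k + 3 := by
    by_contra hge
    have : L[k + 3] ≤ L[j] := sorted_getElem_mono hS hj (by omega)
    omega
  rcases (by omega : j = k + 1 ∨ j = k + 2) with h | h <;> subst h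
  · left; exact hLj.symm
  · right; exact hLj.symm

theorem oesdScan_eq (ranks idxs : List Int) :
    oesdScan ranks idxs =
      if idxs.any (fun i => decide (PySem.List.pyGetD ranks (i + 3) 0 - PySem.List.pyGetD ranks i 0 = 3 ∧
            2 < PySem.List.pyGetD ranks i 0 ∧ PySem.List.pyGetD ranks (i + 3) 0 < 14))
      then some "oesd" else none := by
  induction idxs with
  | nil => simp [oesdScan]
  | cons i is ih =>
    rw [List.any_cons]
    by_cases h1 : PySem.List.pyGetD ranks (i + 3) 0 - PySem.List.pyGetD ranks i 0 = 3
    · by_cases h2 : 2 < PySem.List.pyGetD ranks i 0 ∧ PySem.List.pyGetD ranks (i + 3) 0 < 14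
      · show (if _ then if _ then _ else _ else _) = _
        rw [if_pos h1, if_pos h2, decide_eq_true ⟨h1, h2⟩]
        simp
      · show (if _ then if _ then _ else _ else _) = _
        rw [if_pos h1, if_neg h2, decide_eq_false (by tauto)]
        simpa using ih
    · show (if _ then if _ then _ else _ else _) = _
      rw [if_neg h1, decide_eq_false (by tauto)]
      simpa using ih

theorem gutshotScan_eq (ranks idxs : List Int) :
    gutshotScan ranks idxs =
      if idxs.any (fun i => decide (PySem.List.pyGetD ranks (i + 3) 0 - PySem.List.pyGetD ranks i 0 = 4))
      then some "gutshot" else none := by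
  induction idxs with
  | nil => simp [gutshotScan]
  | cons i is ih =>
    rw [List.any_cons]
    by_cases h1 : PySem.List.pyGetD ranks (i + 3) 0 - PySem.List.pyGetD ranks i 0 = 4
    · show (if _ then _ else _) = _
      rw [if_pos h1, decide_eq_true h1]
      simp
    · show (if _ then _ else _) = _
      rw [if_neg h1, decide_eq_false h1]
      simpa using ih

theorem oesdProbe_eq (mask : Nat) (rs : List Int) :
    oesdProbe mask rs =
      if rs.any (fun r => decide ((mask >>> r.toNat) &&& 15 = 15)) then some "oesd" else none := by
  induction rs with
  | nil => simp [oesdProbe]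
  | cons r rs ih =>
    rw [List.any_cons]
    by_cases h1 : (mask >>> r.toNat) &&& 15 = 15
    · show (if _ then _ else _) = _
      rw [if_pos h1, decide_eq_true h1]
      simp
    · show (if _ then _ else _) = _
      rw [if_neg h1, decide_eq_false h1]
      simpa using ih

theorem gutshotProbe_eq (mask : Nat) (rs : List Int) :
    gutshotProbe mask rs =
      if rs.any (fun r => decide ((mask >>> r.toNat) &&& 17 = 17 ∧
            ((mask >>> (r.toNat + 1)) &&& 1) + ((mask >>> (r.toNat + 2)) &&& 1) + ((mask >>> (r.toNat + 3)) &&& 1) = 2))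
      then some "gutshot" else none := by
  induction rs with
  | nil => simp [gutshotProbe]
  | cons r rs ih =>
    rw [List.any_cons]
    by_cases h1 : (mask >>> r.toNat) &&& 17 = 17 ∧
       ((mask >>> (r.toNat + 1)) &&& 1) + ((mask >>> (r.toNat + 2)) &&& 1) + ((mask >>> (r.toNat + 3)) &&& 1) = 2
    · show (if _ then _ else _) = _
      rw [if_pos h1, decide_eq_true h1]
      simp
    · show (if _ then _ else _) = _
      rw [if_neg h1, decide_eq_false h1]
      simpa using ih

theorem wheel_sum (L : List Int) (hnd : L.Nodup) :
    (L.map (fun r => if r ∈ ([14, 2, 3, 4, 5] : List Int) then (1 : Int) else 0)).sum =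
      (if (2:Int) ∈ L then (1:Int) else 0) + (if (3:Int) ∈ L then 1 else 0) + (if (4:Int) ∈ L then 1 else 0)
        + (if (5:Int) ∈ L then 1 else 0) + (if (14:Int) ∈ L then 1 else 0) := by
  induction L with
  | nil => simp
  | cons x L ih =>
    obtain ⟨hxL, hndL⟩ := List.nodup_cons.mp hnd
    rw [List.map_cons, List.sum_cons, ih hndL]
    by_cases hx : x ∈ ([14, 2, 3, 4, 5] : List Int)
    · rw [if_pos hx]
      have hx5 : x = 14 ∨ x = 2 ∨ x = 3 ∨ x = 4 ∨ x = 5 := by simpa using hx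
      rcases hx5 with h | h | h | h | h <;> subst h <;> simp [List.mem_cons, hxL] <;> ring
    · rw [if_neg hx]
      have e : ∀ w : Int, w ∈ ([14, 2, 3, 4, 5] : List Int) → ((w ∈ x :: L) ↔ (w ∈ L)) := by
        intro w hw
        rw [List.mem_cons]
        constructor
        · rintro (h | h)
          · exact absurd (h ▸ hw) hx
          · exact h
        · exact Or.inr
      rw [if_congr (e 2 (by simp)) rfl rfl, if_congr (e 3 (by simp)) rfl rfl,
          if_congr (e 4 (by simp)) rfl rfl, if_congr (e 5 (by simp)) rfl rfl,
          if_congr (e 14 (by simp)) rfl rfl]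
      ring

theorem oesd_iff {L : List Int} (hS : L.Pairwise (· < ·)) :
    (∃ i : Int, 0 ≤ i ∧ i < PySem.List.len L - 3 ∧
        PySem.List.pyGetD L (i + 3) 0 - PySem.List.pyGetD L i 0 = 3 ∧
        2 < PySem.List.pyGetD L i 0 ∧ PySem.List.pyGetD L (i + 3) 0 < 14) ↔
    (∃ r : Int, 3 ≤ r ∧ r < 11 ∧ r ∈ L ∧ r + 1 ∈ L ∧ r + 2 ∈ L ∧ r + 3 ∈ L) := by
  have hmono := List.pairwise_iff_getElem.mp hS
  constructor
  · rintro ⟨i, h0, hlt, hspan, hgt2, hlt14⟩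
    rw [PySem.List.len_eq] at hlt
    have hk3 : i.toNat + 3 < L.length := by omega
    have gA : PySem.List.pyGetD L i 0 = L[i.toNat]'(by omega) :=
      PySem.List.pyGetD_eq_getElem L 0 h0 (by omega)
    have gB : PySem.List.pyGetD L (i + 3) 0 = L[(i+3).toNat]'(by omega) :=
      PySem.List.pyGetD_eq_getElem L 0 (by omega) (by push_cast; omega)
    have e3 : (i+3).toNat = i.toNat + 3 := by omega
    rw [gA] at hspan hgt2
    rw [gB] at hspan hlt14
    simp only [e3] at hspan hlt14
    have m1 : L[i.toNat]'(by omega) < L[i.toNat + 1]'(by omega) := hmono _ _ _ (by omega) (by omega)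
    have m2 : L[i.toNat + 1]'(by omega) < L[i.toNat + 2]'(by omega) := hmono _ _ (by omega) (by omega) (by omega)
    have m3 : L[i.toNat + 2]'(by omega) < L[i.toNat + 3]'(by omega) := hmono _ _ (by omega) hk3 (by omega)
    refine ⟨L[i.toNat]'(by omega), by omega, by omega, List.getElem_mem _, ?_, ?_, ?_⟩
    · rw [show L[i.toNat]'(by omega) + 1 = L[i.toNat + 1]'(by omega) by omega]
      exact List.getElem_mem _
    · rw [show L[i.toNat]'(by omega) + 2 = L[i.toNat + 2]'(by omega) by omega]
      exact List.getElem_mem _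
    · rw [show L[i.toNat]'(by omega) + 3 = L[i.toNat + 3]'(by omega) by omega]
      exact List.getElem_mem _
  · rintro ⟨r, h3, h11, hr, hr1, hr2, hr3⟩
    obtain ⟨k, hk, hLk⟩ := List.mem_iff_getElem.mp hr
    obtain ⟨hk1, hL1⟩ := suc_of_sorted hS hk hr1 (by omega)
      (fun x hx hgt => by rw [hLk] at hgt; omega)
    obtain ⟨hk2, hL2⟩ := suc_of_sorted hS hk1 hr2 (by omega)
      (fun x hx hgt => by rw [hL1] at hgt; omega)
    obtain ⟨hk3, hL3⟩ := suc_of_sorted hS hk2 hr3 (by omega)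
      (fun x hx hgt => by rw [hL2] at hgt; omega)
    refine ⟨(k : Int), by omega, ?_, ?_⟩
    · rw [PySem.List.len_eq]; push_cast; omega
    · have gA : PySem.List.pyGetD L (k : Int) 0 = L[k] := by
        rw [PySem.List.pyGetD_eq_getElem L 0 (by omega) (by push_cast; omega)]
        simp
      have gB : PySem.List.pyGetD L ((k : Int) + 3) 0 = L[k + 3] := by
        rw [PySem.List.pyGetD_eq_getElem L 0 (by omega) (by push_cast; omega)]
        simp only [show ((k:Int)+3).toNat = k+3 from by omega]
      rw [gA, gB, hLk, hL3]
      omega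

theorem gut_iff {L : List Int} (hS : L.Pairwise (· < ·)) (hrange : ∀ x ∈ L, 0 ≤ x ∧ x ≤ 14) :
    (∃ i : Int, 0 ≤ i ∧ i < PySem.List.len L - 3 ∧
        PySem.List.pyGetD L (i + 3) 0 - PySem.List.pyGetD L i 0 = 4) ↔
    (∃ r : Int, 0 ≤ r ∧ r < 11 ∧ r ∈ L ∧ r + 4 ∈ L ∧
        (if r + 1 ∈ L then (1:Nat) else 0) + (if r + 2 ∈ L then (1:Nat) else 0) + (if r + 3 ∈ L then (1:Nat) else 0) = 2) := by
  have hmono := List.pairwise_iff_getElem.mp hS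
  constructor
  · rintro ⟨i, h0, hlt, hspan⟩
    rw [PySem.List.len_eq] at hlt
    have hk3 : i.toNat + 3 < L.length := by omega
    have gA : PySem.List.pyGetD L i 0 = L[i.toNat]'(by omega) :=
      PySem.List.pyGetD_eq_getElem L 0 h0 (by omega)
    have gB : PySem.List.pyGetD L (i + 3) 0 = L[(i+3).toNat]'(by omega) :=
      PySem.List.pyGetD_eq_getElem L 0 (by omega) (by omega)
    have e3 : (i+3).toNat = i.toNat + 3 := by omega
    rw [gA] at hspan
    rw [gB] at hspan
    simp only [e3] at hspan
    have m1 : L[i.toNat]'(by omega) < L[i.toNat + 1]'(by omega) := hmono _ _ (by omega) (by omega) (by omega)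
    have m2 : L[i.toNat + 1]'(by omega) < L[i.toNat + 2]'(by omega) := hmono _ _ (by omega) (by omega) (by omega)
    have m3 : L[i.toNat + 2]'(by omega) < L[i.toNat + 3]'(by omega) := hmono _ _ (by omega) hk3 (by omega)
    have hb0 : 0 ≤ L[i.toNat]'(by omega) := (hrange _ (List.getElem_mem _)).1
    have hb14 : L[i.toNat + 3]'(by omega) ≤ 14 := (hrange _ (List.getElem_mem _)).2
    refine ⟨L[i.toNat]'(by omega), hb0, by omega, List.getElem_mem _, ?_, ?_⟩
    · rw [show L[i.toNat]'(by omega) + 4 = L[i.toNat + 3]'(by omega) by omega]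
      exact List.getElem_mem _
    · have hbet : ∀ x ∈ L, L[i.toNat]'(by omega) < x → x < L[i.toNat]'(by omega) + 4 →
          (x = L[i.toNat + 1]'(by omega) ∨ x = L[i.toNat + 2]'(by omega)) := by
        intro x hx hgt hlt4
        exact between_of_sorted hS hk3 hx hgt (by omega)
      rcases (by omega : (L[i.toNat + 1]'(by omega) = L[i.toNat]'(by omega) + 1 ∧ L[i.toNat + 2]'(by omega) = L[i.toNat]'(by omega) + 2) ∨
          (L[i.toNat + 1]'(by omega) = L[i.toNat]'(by omega) + 1 ∧ L[i.toNat + 2]'(by omega) = L[i.toNat]'(by omega) + 3) ∨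
          (L[i.toNat + 1]'(by omega) = L[i.toNat]'(by omega) + 2 ∧ L[i.toNat + 2]'(by omega) = L[i.toNat]'(by omega) + 3)) with
        ⟨hb, hc⟩ | ⟨hb, hc⟩ | ⟨hb, hc⟩
      · have p1 : L[i.toNat]'(by omega) + 1 ∈ L := by rw [← hb]; exact List.getElem_mem _
        have p2 : L[i.toNat]'(by omega) + 2 ∈ L := by rw [← hc]; exact List.getElem_mem _
        have p3 : L[i.toNat]'(by omega) + 3 ∉ L := fun hmem => by
          rcases hbet _ hmem (by omega) (by omega) with h | h <;> omega
        rw [if_pos p1, if_pos p2, if_neg p3]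
      · have p1 : L[i.toNat]'(by omega) + 1 ∈ L := by rw [← hb]; exact List.getElem_mem _
        have p3 : L[i.toNat]'(by omega) + 3 ∈ L := by rw [← hc]; exact List.getElem_mem _
        have p2 : L[i.toNat]'(by omega) + 2 ∉ L := fun hmem => by
          rcases hbet _ hmem (by omega) (by omega) with h | h <;> omega
        rw [if_pos p1, if_neg p2, if_pos p3]
      · have p2 : L[i.toNat]'(by omega) + 2 ∈ L := by rw [← hb]; exact List.getElem_mem _
        have p3 : L[i.toNat]'(by omega) + 3 ∈ L := by rw [← hc]; exact List.getElem_mem _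
        have p1 : L[i.toNat]'(by omega) + 1 ∉ L := fun hmem => by
          rcases hbet _ hmem (by omega) (by omega) with h | h <;> omega
        rw [if_neg p1, if_pos p2, if_pos p3]
  · rintro ⟨r, hr0, hr11, hr, hr4, hsum⟩
    obtain ⟨k, hk, hLk⟩ := List.mem_iff_getElem.mp hr
    by_cases m1 : r + 1 ∈ L <;> by_cases m2 : r + 2 ∈ L <;> by_cases m3 : r + 3 ∈ L
    · rw [if_pos m1, if_pos m2, if_pos m3] at hsum; omega
    · -- r+1, r+2 present, r+3 absent
      obtain ⟨hk1, hL1⟩ := suc_of_sorted hS hk m1 (by omega) (fun x hx hgt => by rw [hLk] at hgt; omega)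
      obtain ⟨hk2, hL2⟩ := suc_of_sorted hS hk1 m2 (by omega) (fun x hx hgt => by rw [hL1] at hgt; omega)
      obtain ⟨hk3, hL3⟩ := suc_of_sorted hS hk2 hr4 (by omega) (fun x hx hgt => by
        rw [hL2] at hgt
        rcases eq_or_ne x (r + 3) with he | hne
        · exact absurd (he ▸ hx) m3
        · omega)
      refine ⟨(k : Int), by omega, by rw [PySem.List.len_eq]; omega, ?_⟩
      have gA : PySem.List.pyGetD L (k : Int) 0 = L[k] := by
        rw [PySem.List.pyGetD_eq_getElem L 0 (by omega) (by omega)]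
        simp
      have gB : PySem.List.pyGetD L ((k : Int) + 3) 0 = L[k + 3] := by
        rw [PySem.List.pyGetD_eq_getElem L 0 (by omega) (by omega)]
        simp only [show ((k:Int)+3).toNat = k+3 from by omega]
      rw [gA, gB, hLk, hL3]
      omega
    · -- r+1, r+3 present, r+2 absent
      obtain ⟨hk1, hL1⟩ := suc_of_sorted hS hk m1 (by omega) (fun x hx hgt => by rw [hLk] at hgt; omega)
      obtain ⟨hk2, hL2⟩ := suc_of_sorted hS hk1 m3 (by omega) (fun x hx hgt => by
        rw [hL1] at hgt
        rcases eq_or_ne x (r + 2) with he | hne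
        · exact absurd (he ▸ hx) m2
        · omega)
      obtain ⟨hk3, hL3⟩ := suc_of_sorted hS hk2 hr4 (by omega) (fun x hx hgt => by rw [hL2] at hgt; omega)
      refine ⟨(k : Int), by omega, by rw [PySem.List.len_eq]; omega, ?_⟩
      have gA : PySem.List.pyGetD L (k : Int) 0 = L[k] := by
        rw [PySem.List.pyGetD_eq_getElem L 0 (by omega) (by omega)]
        simp
      have gB : PySem.List.pyGetD L ((k : Int) + 3) 0 = L[k + 3] := by
        rw [PySem.List.pyGetD_eq_getElem L 0 (by omega) (by omega)]
        simp only [show ((k:Int)+3).toNat = k+3 from by omega]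
      rw [gA, gB, hLk, hL3]
      omega
    · rw [if_pos m1, if_neg m2, if_neg m3] at hsum; omega
    · -- r+2, r+3 present, r+1 absent
      obtain ⟨hk1, hL1⟩ := suc_of_sorted hS hk m2 (by omega) (fun x hx hgt => by
        rw [hLk] at hgt
        rcases eq_or_ne x (r + 1) with he | hne
        · exact absurd (he ▸ hx) m1
        · omega)
      obtain ⟨hk2, hL2⟩ := suc_of_sorted hS hk1 m3 (by omega) (fun x hx hgt => by rw [hL1] at hgt; omega)
      obtain ⟨hk3, hL3⟩ := suc_of_sorted hS hk2 hr4 (by omega) (fun x hx hgt => by rw [hL2] at hgt; omega)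
      refine ⟨(k : Int), by omega, by rw [PySem.List.len_eq]; omega, ?_⟩
      have gA : PySem.List.pyGetD L (k : Int) 0 = L[k] := by
        rw [PySem.List.pyGetD_eq_getElem L 0 (by omega) (by omega)]
        simp
      have gB : PySem.List.pyGetD L ((k : Int) + 3) 0 = L[k + 3] := by
        rw [PySem.List.pyGetD_eq_getElem L 0 (by omega) (by omega)]
        simp only [show ((k:Int)+3).toNat = k+3 from by omega]
      rw [gA, gB, hLk, hL3]
      omega
    · rw [if_neg m1, if_pos m2, if_neg m3] at hsum; omega
    · rw [if_neg m1, if_neg m2, if_pos m3] at hsum; omega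
    · rw [if_neg m1, if_neg m2, if_neg m3] at hsum; omega

-- ===== VERDICT (by name: the statement is the Claim_ definition above) =====
theorem count_straight_draw_spec : Claim_equal_count_straight_draw := by
  intro cards _ hpre
  unfold Spec_count_straight_draw
  have hpre' : ∀ c ∈ cards, c ≠ "" := hpre
  show straight_from_ranks (PySem.List.sorted (PySem.Set.ofList (cards.map card_rank)) (fun x => x) false)
      = straight_from_mask (maskOf cards)
  set m := maskOf cards with hm
  set L := PySem.List.sorted (PySem.Set.ofList (cards.map card_rank)) (fun x => x) false with hL
  have hS : L.Pairwise (· < ·) := PySem.List.sorted_ofList_pairwise_lt _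
  have hnd : L.Nodup := hS.nodup
  have hmemL : ∀ x : Int, x ∈ L ↔ x ∈ cards.map card_rank := fun x => by
    rw [hL, PySem.List.mem_sorted, PySem.Set.mem_ofList]
  have hrange : ∀ x ∈ L, 0 ≤ x ∧ x ≤ 14 := by
    intro x hx
    obtain ⟨c, hc, hcx⟩ := List.mem_map.mp ((hmemL x).mp hx)
    obtain ⟨-, h0, h14⟩ := rank_bit_eq c (hpre' c hc)
    rw [hcx] at h0 h14
    exact ⟨h0, h14⟩
  have hbit : ∀ j : Nat, m.testBit j = decide ((j : Int) ∈ L) := fun j => by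
    rw [hm, maskOf_testBit cards hpre' j]
    exact decide_eq_decide.mpr (hmemL _).symm
  have hbit' : ∀ r : Int, 0 ≤ r → ∀ s : Nat, (m.testBit (r.toNat + s) ↔ r + s ∈ L) := by
    intro r hr s
    rw [show r.toNat + s = ((r + s : Int)).toNat from by omega, hbit]
    rw [show (((r + s : Int)).toNat : Int) = r + s from by omega]
    simp
  have EO : oesdScan L (PySem.List.pyRange 0 (PySem.List.len L - 3) 1) = oesdProbe m (PySem.List.pyRange 3 11 1) := by
    rw [oesdScan_eq, oesdProbe_eq]
    have hcond : ((PySem.List.pyRange 0 (PySem.List.len L - 3) 1).any (fun i =>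
          decide (PySem.List.pyGetD L (i + 3) 0 - PySem.List.pyGetD L i 0 = 3 ∧
            2 < PySem.List.pyGetD L i 0 ∧ PySem.List.pyGetD L (i + 3) 0 < 14)))
        = ((PySem.List.pyRange 3 11 1).any (fun r => decide ((m >>> r.toNat) &&& 15 = 15))) := by
      rw [Bool.eq_iff_iff]
      simp only [List.any_eq_true, PySem.List.mem_pyRange_one, decide_eq_true_eq]
      constructor
      · rintro ⟨i, ⟨h0, hlt⟩, hc⟩
        obtain ⟨r, h3, h11, hr, hr1, hr2, hr3⟩ := (oesd_iff hS).mp ⟨i, h0, hlt, hc⟩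
        refine ⟨r, ⟨h3, h11⟩, ?_⟩
        rw [and15_iff]
        refine ⟨?_, ?_, ?_, ?_⟩
        · have := (hbit' r (by omega) 0).mpr (by simpa using hr)
          simpa using this
        · exact (hbit' r (by omega) 1).mpr hr1
        · exact (hbit' r (by omega) 2).mpr hr2
        · exact (hbit' r (by omega) 3).mpr hr3
      · rintro ⟨r, ⟨h3, h11⟩, hc⟩
        rw [and15_iff] at hc
        obtain ⟨b0, b1, b2, b3⟩ := hc
        obtain ⟨i, h0, hlt, hcc⟩ := (oesd_iff hS).mpr ⟨r, h3, h11,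
          by simpa using (hbit' r (by omega) 0).mp (by simpa using b0),
          (hbit' r (by omega) 1).mp b1, (hbit' r (by omega) 2).mp b2, (hbit' r (by omega) 3).mp b3⟩
        exact ⟨i, ⟨h0, hlt⟩, hcc⟩
    rw [hcond]
  have hmid : ∀ r : Int, 0 ≤ r → ∀ s : Nat, ((m >>> (r.toNat + s)) &&& 1) = if r + s ∈ L then 1 else 0 := by
    intro r hr s
    rw [bit_ind]
    by_cases h : r + s ∈ L
    · rw [if_pos ((hbit' r hr s).mpr h), if_pos h]
    · rw [if_neg (fun hb => h ((hbit' r hr s).mp hb)), if_neg h]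
  have EG : gutshotScan L (PySem.List.pyRange 0 (PySem.List.len L - 3) 1) = gutshotProbe m (PySem.List.pyRange 0 11 1) := by
    rw [gutshotScan_eq, gutshotProbe_eq]
    have hcond : ((PySem.List.pyRange 0 (PySem.List.len L - 3) 1).any (fun i =>
          decide (PySem.List.pyGetD L (i + 3) 0 - PySem.List.pyGetD L i 0 = 4)))
        = ((PySem.List.pyRange 0 11 1).any (fun r => decide ((m >>> r.toNat) &&& 17 = 17 ∧
            ((m >>> (r.toNat + 1)) &&& 1) + ((m >>> (r.toNat + 2)) &&& 1) + ((m >>> (r.toNat + 3)) &&& 1) = 2))) := by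
      rw [Bool.eq_iff_iff]
      simp only [List.any_eq_true, PySem.List.mem_pyRange_one, decide_eq_true_eq]
      constructor
      · rintro ⟨i, ⟨h0, hlt⟩, hc⟩
        obtain ⟨r, hr0, hr11, hr, hr4, hsum⟩ := (gut_iff hS hrange).mp ⟨i, h0, hlt, hc⟩
        refine ⟨r, ⟨hr0, hr11⟩, ?_, ?_⟩
        · rw [and17_iff]
          constructor
          · have := (hbit' r hr0 0).mpr (by simpa using hr)
            simpa using this
          · exact (hbit' r hr0 4).mpr hr4
        · rw [hmid r hr0 1, hmid r hr0 2, hmid r hr0 3]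
          exact hsum
      · rintro ⟨r, ⟨hr0, hr11⟩, hc, hsum⟩
        rw [and17_iff] at hc
        rw [hmid r hr0 1, hmid r hr0 2, hmid r hr0 3] at hsum
        obtain ⟨i, h0, hlt, hcc⟩ := (gut_iff hS hrange).mpr ⟨r, hr0, hr11,
          by simpa using (hbit' r hr0 0).mp (by simpa using hc.1),
          (hbit' r hr0 4).mp hc.2, hsum⟩
        exact ⟨i, ⟨h0, hlt⟩, hcc⟩
    rw [hcond]
  have EW : (L.map (fun r => if r ∈ ([14, 2, 3, 4, 5] : List Int) then (1 : Int) else 0)).sum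
      = ((((m >>> 2) &&& 1) + ((m >>> 3) &&& 1) + ((m >>> 4) &&& 1) + ((m >>> 5) &&& 1) + ((m >>> 14) &&& 1) : Nat) : Int) := by
    have hmidn : ∀ j : Nat, ((m >>> j) &&& 1) = if ((j : Int)) ∈ L then 1 else 0 := fun j => by
      rw [bit_ind, hbit j]
      by_cases h : ((j : Int)) ∈ L <;> simp [h]
    have b2 := hmidn 2
    have b3 := hmidn 3
    have b4 := hmidn 4
    have b5 := hmidn 5
    have b14 := hmidn 14
    push_cast at b2 b3 b4 b5 b14
    rw [wheel_sum L hnd, b2, b3, b4, b5, b14]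
    push_cast [apply_ite (fun n : Nat => (n : Int))]
    ring
  unfold straight_from_ranks straight_from_mask
  rw [EO, EG]
  cases oesdProbe m (PySem.List.pyRange 3 11 1) with
  | some s => rfl
  | none =>
    cases gutshotProbe m (PySem.List.pyRange 0 11 1) with
    | some s => rfl
    | none =>
      simp only []
      rw [EW]
      split_ifs <;> first | rfl | omega
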